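-- pv_equiv track=rewrite | github.com/lethiess/ai-concierge | concierge/services/audio_converter.py | linear_to_mulaw
-- ===== SOURCE A (Python) =====
-- MULAW_BIAS = 33
--
-- MULAW_MAX = 0x1FFF  # Max 13-bit value
--
-- def linear_to_mulaw(linear_value: int) -> int:
--     """Encode a linear PCM value to mulaw byte using G.711 standard.
--
--     Args:
--         linear_value: Linear PCM value (-32768 to 32767)
--
--     Returns:
--         Mulaw encoded byte (0-255)
--     """
--     # Store sign and get absolute value
--     sign = 0x80 if linear_value < 0 else 0x00
--     linear_value = abs(linear_value)
--
--     # Add bias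
--     linear_value += MULAW_BIAS
--
--     # Clip to max value
--     linear_value = min(linear_value, MULAW_MAX)
--
--     # Find exponent (position of highest set bit)
--     exponent = 7
--     for i in range(7, -1, -1):
--         if linear_value >= (33 << i):
--             exponent = i
--             break
--
--     # Extract mantissa (4 bits after implicit leading bit)
--     mantissa = (linear_value >> (exponent + 1)) & 0x0F
--
--     # Combine sign, exponent, and mantissa
--     mulaw_byte = sign | (exponent << 4) | mantissa
--
--     # Invert all bits (G.711 standard)
--     return ~mulaw_byte & 0xFF
-- ===== SOURCE B (Python) =====
-- MULAW_BIAS = 33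
--
-- MULAW_MAX = 0x1FFF  # Max 13-bit value
--
--
-- def linear_to_mulaw(linear_value: int) -> int:
--     """Encode a linear PCM value to mulaw byte using G.711 standard."""
--     sign = 0x80 if linear_value < 0 else 0x00
--     linear_value = min(abs(linear_value) + MULAW_BIAS, MULAW_MAX)
--     # closed-form exponent: largest i with linear_value >= 33 << i
--     exponent = (linear_value // MULAW_BIAS).bit_length() - 1
--     mantissa = (linear_value >> (exponent + 1)) & 0x0F
--     return ~(sign | (exponent << 4) | mantissa) & 0xFF
-- ===== Notes on version B (the rewrite author's own statement) =====
-- stated objective: idiomatic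
-- what changed: Replaces the descending linear search for the exponent with a closed form: exponent = bit_length of the bias-clipped value divided by MULAW_BIAS, minus one.
import Mathlib
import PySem

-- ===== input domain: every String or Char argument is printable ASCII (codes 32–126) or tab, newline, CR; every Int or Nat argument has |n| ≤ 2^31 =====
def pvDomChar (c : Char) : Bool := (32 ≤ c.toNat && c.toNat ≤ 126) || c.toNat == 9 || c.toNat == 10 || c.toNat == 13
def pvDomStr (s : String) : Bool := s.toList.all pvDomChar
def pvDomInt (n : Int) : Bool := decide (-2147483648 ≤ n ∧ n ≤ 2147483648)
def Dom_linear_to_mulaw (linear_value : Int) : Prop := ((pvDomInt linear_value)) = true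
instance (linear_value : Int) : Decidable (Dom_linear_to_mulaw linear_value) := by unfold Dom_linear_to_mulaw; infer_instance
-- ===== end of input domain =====

-- B replaces A's descending threshold search loop for the exponent by the closed form
-- (clipped_value // 33).bit_length() - 1; objective: more idiomatic, same cost.

-- ===== PORT A =====
-- A's descending for-loop with break over range(7,-1,-1), carrying (exponent, found).
-- Every i produced by range(7,-1,-1) is nonnegative, so Python's `33 << i` is `33 <<< i.toNat`.
def pvStep (v : Int) (st : Int × Bool) (i : Int) : Int × Bool :=
  if st.2 then st
  else if v ≥ (33 : Int) <<< i.toNat then (i, true) else st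

def pvExpA (v : Int) : Int :=
  ((PySem.List.pyRange 7 (-1) (-1)).foldl (pvStep v) (7, false)).1

def linear_to_mulaw (linear_value : Int) : Int :=
  let sign : Int := if linear_value < 0 then 0x80 else 0x00
  let v : Int := |linear_value| + 33
  let v : Int := min v 8191
  let exponent : Int := pvExpA v
  -- exponent + 1 ≥ 1, so Python's `>> (exponent+1)` is `>>> (exponent+1).toNat`
  let mantissa : Int := PySem.Int.band (v >>> (exponent + 1).toNat) 0x0F
  let mulaw_byte : Int := PySem.Int.bor (PySem.Int.bor sign (exponent <<< (4 : Nat))) mantissa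
  PySem.Int.band (Int.not mulaw_byte) 0xFF

-- ===== PORT B =====
def pvExpB (v : Int) : Int :=
  (PySem.Int.bitLength (PySem.Int.floordiv v 33) : Int) - 1

def linear_to_mulaw_alt (linear_value : Int) : Int :=
  let sign : Int := if linear_value < 0 then 0x80 else 0x00
  let v : Int := min (|linear_value| + 33) 8191
  let exponent : Int := pvExpB v
  let mantissa : Int := PySem.Int.band (v >>> (exponent + 1).toNat) 0x0F
  PySem.Int.band (Int.not (PySem.Int.bor (PySem.Int.bor sign (exponent <<< (4 : Nat))) mantissa)) 0xFF

-- ===== PRECONDITION & SPEC =====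
def Spec_linear_to_mulaw (linear_value : Int) (out : Int) : Prop := out = linear_to_mulaw_alt linear_value
instance (linear_value : Int) (out : Int) : Decidable (Spec_linear_to_mulaw linear_value out) := by unfold Spec_linear_to_mulaw; infer_instance

-- ===== CLAIM (what is proved, stated in full; the proofs are below) =====
def Claim_equal_linear_to_mulaw : Prop := ∀ (linear_value : Int), Dom_linear_to_mulaw linear_value → Spec_linear_to_mulaw linear_value (linear_to_mulaw linear_value)

-- ===== LEMMAS AND PROOFS =====

-- once the loop has found its exponent, the rest of the fold changes nothing
theorem pv_fold_found (v : Int) (l : List Int) (e : Int) :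
    l.foldl (pvStep v) (e, true) = (e, true) := by
  induction l with
  | nil => rfl
  | cons a l ih => simp [List.foldl_cons, pvStep, ih]

theorem pv_fold_cons (v e i : Int) (l : List Int) :
    (i :: l).foldl (pvStep v) (e, false) =
      if (33 : Int) <<< i.toNat ≤ v then (i, true) else l.foldl (pvStep v) (e, false) := by
  simp only [List.foldl_cons]
  by_cases h : (33 : Int) <<< i.toNat ≤ v
  · simp [pvStep, h, pv_fold_found]
  · simp [pvStep, h]

-- A's loop as a chain of threshold tests
theorem pvExpA_closed (v : Int) :
    pvExpA v =
      if (4224:Int) ≤ v then 7 else if (2112:Int) ≤ v then 6 else if (1056:Int) ≤ v then 5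
      else if (528:Int) ≤ v then 4 else if (264:Int) ≤ v then 3 else if (132:Int) ≤ v then 2
      else if (66:Int) ≤ v then 1 else if (33:Int) ≤ v then 0 else 7 := by
  have hrange : PySem.List.pyRange 7 (-1) (-1) = [7,6,5,4,3,2,1,0] := by decide
  have d7 : (33 : Int) <<< ((7:Int)).toNat = 4224 := by decide
  have d6 : (33 : Int) <<< ((6:Int)).toNat = 2112 := by decide
  have d5 : (33 : Int) <<< ((5:Int)).toNat = 1056 := by decide
  have d4 : (33 : Int) <<< ((4:Int)).toNat = 528 := by decide
  have d3 : (33 : Int) <<< ((3:Int)).toNat = 264 := by decide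
  have d2 : (33 : Int) <<< ((2:Int)).toNat = 132 := by decide
  have d1 : (33 : Int) <<< ((1:Int)).toNat = 66 := by decide
  have d0 : (33 : Int) <<< ((0:Int)).toNat = 33 := by decide
  unfold pvExpA
  rw [hrange, pv_fold_cons, d7, pv_fold_cons, d6, pv_fold_cons, d5, pv_fold_cons, d4,
      pv_fold_cons, d3, pv_fold_cons, d2, pv_fold_cons, d1, pv_fold_cons, d0]
  simp only [List.foldl_nil]
  split_ifs <;> rfl

theorem pv_bitLength_eq_of (q : Int) (i : Nat)
    (h1 : ((2^i : Nat) : Int) ≤ q) (h2 : q < ((2^(i+1) : Nat) : Int)) :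
    PySem.Int.bitLength q = i + 1 := by
  have hp : 0 < 2^i := Nat.two_pow_pos i
  have hq0 : q ≠ 0 := by omega
  have hb1 := PySem.Int.lt_two_pow_bitLength q
  have hb2 := PySem.Int.two_pow_bitLength_le q hq0
  set bl := PySem.Int.bitLength q with hbl
  have h1n : 2^i ≤ q.natAbs := by omega
  have h2n : q.natAbs < 2^(i+1) := by omega
  rcases Nat.lt_or_ge bl (i+1) with h | h
  · have : (2:Nat)^bl ≤ 2^i := Nat.pow_le_pow_right (by norm_num) (by omega)
    omega
  rcases Nat.lt_or_ge bl (i+2) with h' | h'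
  · omega
  · have : (2:Nat)^(i+1) ≤ 2^(bl-1) := Nat.pow_le_pow_right (by norm_num) (by omega)
    omega

theorem pvExpB_eq (v : Int) (i : Nat)
    (h1 : 33 * ((2^i : Nat) : Int) ≤ v) (h2 : v < 33 * ((2^(i+1) : Nat) : Int)) :
    pvExpB v = (i : Int) := by
  have hq1 : ((2^i : Nat) : Int) ≤ PySem.Int.floordiv v 33 := by
    rw [PySem.Int.le_floordiv_iff_mul_le (by norm_num)]; linarith
  have hq2 : PySem.Int.floordiv v 33 < ((2^(i+1) : Nat) : Int) := by
    rw [PySem.Int.floordiv_lt_iff_lt_mul (by norm_num)]; linarith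
  unfold pvExpB
  rw [pv_bitLength_eq_of _ i hq1 hq2]
  push_cast; ring

-- the two exponent computations agree on the clipped range [33, 8191]
theorem pvExp_eq (v : Int) (hlo : 33 ≤ v) (hhi : v ≤ 8191) : pvExpA v = pvExpB v := by
  rw [pvExpA_closed]
  by_cases c7 : 4224 ≤ v
  · rw [pvExpB_eq v 7 (by norm_num; omega) (by norm_num; omega)]; split_ifs <;> omega
  by_cases c6 : 2112 ≤ v
  · rw [pvExpB_eq v 6 (by norm_num; omega) (by norm_num; omega)]; split_ifs <;> omega
  by_cases c5 : 1056 ≤ v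
  · rw [pvExpB_eq v 5 (by norm_num; omega) (by norm_num; omega)]; split_ifs <;> omega
  by_cases c4 : 528 ≤ v
  · rw [pvExpB_eq v 4 (by norm_num; omega) (by norm_num; omega)]; split_ifs <;> omega
  by_cases c3 : 264 ≤ v
  · rw [pvExpB_eq v 3 (by norm_num; omega) (by norm_num; omega)]; split_ifs <;> omega
  by_cases c2 : 132 ≤ v
  · rw [pvExpB_eq v 2 (by norm_num; omega) (by norm_num; omega)]; split_ifs <;> omega
  by_cases c1 : 66 ≤ v
  · rw [pvExpB_eq v 1 (by norm_num; omega) (by norm_num; omega)]; split_ifs <;> omega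
  · rw [pvExpB_eq v 0 (by norm_num; omega) (by norm_num; omega)]; split_ifs <;> omega

-- ===== VERDICT (by name: the statement is the Claim_ definition above) =====
theorem linear_to_mulaw_spec : Claim_equal_linear_to_mulaw := by
  intro x _
  unfold Spec_linear_to_mulaw
  simp only [linear_to_mulaw, linear_to_mulaw_alt]
  have habs : 0 ≤ |x| := abs_nonneg x
  rw [pvExp_eq (min (|x| + 33) 8191) (le_min (by omega) (by norm_num)) (min_le_right _ _)]
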